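-- pv_equiv track=rewrite | github.com/cipp00h/algorithm | 프로그래머스/0/181881. 조건에 맞게 수열 변환하기 2/조건에 맞게 수열 변환하기 2.py | solution
-- ===== SOURCE A (Python) =====
-- def solution(arr):
--     x = 0
--
--     while True:
--         updated_arr = [(num // 2 if num >= 50 and num % 2 == 0 else
--                  num * 2 + 1 if num < 50 and num % 2 == 1 else num)
--                 for num in arr]
--
--         if arr == updated_arr:
--             return x
--
--         arr = updated_arr
--         x += 1
-- ===== SOURCE B (Python) =====
-- def solution(arr):
--     best = 0
--     for num in arr:
--         c = 0
--         v = num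
--         while True:
--             nxt = v // 2 if v >= 50 and v % 2 == 0 else v * 2 + 1 if v < 50 and v % 2 == 1 else v
--             if nxt == v:
--                 break
--             v = nxt
--             c += 1
--         if c > best:
--             best = c
--     return best
-- ===== Notes on version B (the rewrite author's own statement) =====
-- stated objective: alternative
-- what changed: Element-major traversal: for each element an inner loop counts its own steps to a fixpoint and a running maximum is kept, instead of A's repeated whole-array rebuild-and-compare.
import Mathlib
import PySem

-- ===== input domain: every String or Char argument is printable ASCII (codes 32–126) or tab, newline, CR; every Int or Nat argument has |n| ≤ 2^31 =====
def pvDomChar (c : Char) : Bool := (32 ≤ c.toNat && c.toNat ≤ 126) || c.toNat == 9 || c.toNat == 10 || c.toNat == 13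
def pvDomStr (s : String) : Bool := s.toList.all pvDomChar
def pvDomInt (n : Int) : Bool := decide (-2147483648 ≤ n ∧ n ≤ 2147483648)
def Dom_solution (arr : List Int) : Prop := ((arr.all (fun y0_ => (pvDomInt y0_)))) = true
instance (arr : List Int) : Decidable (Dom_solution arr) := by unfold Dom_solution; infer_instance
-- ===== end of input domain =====

-- B replaces A's repeated whole-array rebuild-and-compare by an element-major traversal
-- (inner per-element fixpoint loop, running maximum); objective: alternative decomposition.

-- ===== PORT A =====
-- the conditional-expression transform applied to each element (shared syntax of both Pythons)
def pvStep (num : Int) : Int :=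
  if num ≥ 50 ∧ PySem.Int.mod num 2 = 0 then PySem.Int.floordiv num 2
  else if num < 50 ∧ PySem.Int.mod num 2 = 1 then num * 2 + 1
  else num

-- A's 'while True' ported with fuel 64; on Pre_∩Dom the loop provably finishes within 64
-- rounds (lemma pv_fix_64 below), so the fuel is never exhausted on admitted inputs.
def solutionLoop (fuel : Nat) (arr : List Int) (x : Int) : Int :=
  match fuel with
  | 0 => x
  | fuel + 1 =>
    let updated_arr := arr.map pvStep
    if arr = updated_arr then x
    else solutionLoop fuel updated_arr (x + 1)

def solution (arr : List Int) : Int := solutionLoop 64 arr 0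

-- ===== PORT B =====
-- B's inner 'while True' with the same fuel 64 (sufficient on Pre_∩Dom, same lemma)
def stepCount (fuel : Nat) (v : Int) (c : Int) : Int :=
  match fuel with
  | 0 => c
  | fuel + 1 =>
    let nxt := pvStep v
    if nxt = v then c else stepCount fuel nxt (c + 1)

def solution_alt (arr : List Int) : Int :=
  arr.foldl (fun best num =>
    let c := stepCount 64 num 0
    if c > best then c else best) 0

-- ===== PRECONDITION & SPEC =====
-- Pre_ excludes arrays containing an odd element ≤ -3: there A's while-loop never
-- terminates (2n+1 stays odd and < 50), so A returns on exactly the inputs admitted here.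
def Pre_solution (arr : List Int) : Prop := ∀ n ∈ arr, ¬(n % 2 = 1 ∧ n < -1)
instance (arr : List Int) : Decidable (Pre_solution arr) := by unfold Pre_solution; infer_instance
def pvWitness_solution : List Int := [100, 3, -1, 0, 49]

def Spec_solution (arr : List Int) (out : Int) : Prop := out = solution_alt arr
instance (arr : List Int) (out : Int) : Decidable (Spec_solution arr out) := by unfold Spec_solution; infer_instance

-- ===== CLAIM (what is proved, stated in full; the proofs are below) =====
def Claim_equal_solution : Prop := ∀ (arr : List Int), Dom_solution arr → Pre_solution arr → Spec_solution arr (solution arr)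

-- ===== LEMMAS AND PROOFS =====

-- abbreviations used only by the proofs
def pvFix (v : Int) : Prop := pvStep v = v

def pvMX (F : Nat) (arr : List Int) : Int :=
  arr.foldl (fun best num =>
    let c := stepCount F num 0
    if c > best then c else best) 0

lemma pvStep_odd_small {n : Int} (h1 : n % 2 = 1) (h2 : n < 50) : pvStep n = n * 2 + 1 := by
  have hm : PySem.Int.mod n 2 = n % 2 := PySem.Int.mod_eq_emod_of_pos (by omega)
  simp [pvStep, h1, h2]

lemma pvStep_even_big {n : Int} (h1 : n % 2 = 0) (h2 : 50 ≤ n) : pvStep n = n / 2 := by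
  have hm : PySem.Int.mod n 2 = n % 2 := PySem.Int.mod_eq_emod_of_pos (by omega)
  have hd : PySem.Int.floordiv n 2 = n / 2 := PySem.Int.floordiv_eq_ediv_of_pos (by omega)
  simp [pvStep, h1, h2]

lemma pvFix_odd_big {n : Int} (h1 : n % 2 = 1) (h2 : 50 ≤ n) : pvFix n := by
  have hm : PySem.Int.mod n 2 = n % 2 := PySem.Int.mod_eq_emod_of_pos (by omega)
  simp [pvFix, pvStep, h1]; omega

lemma pvFix_even_small {n : Int} (h1 : n % 2 = 0) (h2 : n < 50) : pvFix n := by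
  have hm : PySem.Int.mod n 2 = n % 2 := PySem.Int.mod_eq_emod_of_pos (by omega)
  simp [pvFix, pvStep, h1]; omega

lemma pvFix_neg_one : pvFix (-1) := by unfold pvFix; decide

lemma pvFix_iterate {v : Int} (h : pvFix v) : ∀ k, pvStep^[k] v = v := by
  intro k; induction k with
  | zero => rfl
  | succ k ih => rw [Function.iterate_succ_apply, h, ih]

lemma pvFix_mono {n : Int} {j : Nat} (h : pvFix (pvStep^[j] n)) :
    ∀ k, j ≤ k → pvFix (pvStep^[k] n) := by
  intro k hk
  obtain ⟨d, rfl⟩ := Nat.exists_eq_add_of_le hk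
  rw [Nat.add_comm, Function.iterate_add_apply, pvFix_iterate h]
  exact h

-- odd positive chain: odd n ≥ a_k stabilizes in k doubling steps
lemma pv_odd_chain : ∀ n : Int, n % 2 = 1 → 1 ≤ n → pvFix (pvStep^[5] n) := by
  have step : ∀ (j : Nat) (a b : Int),
      (∀ n : Int, n % 2 = 1 → b ≤ n → ∀ k, j ≤ k → pvFix (pvStep^[k] n)) →
      2 * a + 1 ≥ b →
      (∀ n : Int, n % 2 = 1 → a ≤ n → ∀ k, j + 1 ≤ k → pvFix (pvStep^[k] n)) := by
    intro j a b ih hab n h1 h2 k hk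
    by_cases h50 : 50 ≤ n
    · exact pvFix_mono (j := 0) (pvFix_odd_big h1 h50) k (by omega)
    · obtain ⟨k', rfl⟩ : ∃ k', k = k' + 1 := ⟨k - 1, by omega⟩
      rw [Function.iterate_succ_apply, pvStep_odd_small h1 (by omega)]
      exact ih (n * 2 + 1) (by omega) (by omega) k' (by omega)
  have c0 : ∀ n : Int, n % 2 = 1 → (50:Int) ≤ n → ∀ k, 0 ≤ k → pvFix (pvStep^[k] n) := by
    intro n h1 h2 k _
    exact pvFix_mono (j := 0) (pvFix_odd_big h1 h2) k (by omega)
  have c1 := step 0 25 50 c0 (by omega)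
  have c2 := step 1 12 25 c1 (by omega)
  have c3 := step 2 6 12 c2 (by omega)
  have c4 := step 3 3 6 c3 (by omega)
  have c5 := step 4 1 3 c4 (by omega)
  intro n h1 h2
  exact c5 n h1 h2 5 (by omega)

-- even chain: even n < 50·2^k stabilizes within k+5 steps
lemma pv_even_chain : ∀ (k : Nat) (n : Int), n % 2 = 0 → n < 50 * 2 ^ k → pvFix (pvStep^[k + 5] n) := by
  intro k
  induction k with
  | zero =>
    intro n h1 h2
    exact pvFix_mono (j := 0) (pvFix_even_small h1 (by simpa using h2)) 5 (by omega)
  | succ k ih =>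
    intro n h1 h2
    by_cases h50 : n < 50
    · exact pvFix_mono (j := 0) (pvFix_even_small h1 h50) (k + 1 + 5) (by omega)
    · have hstep : pvStep n = n / 2 := pvStep_even_big h1 (by omega)
      have hbound : n / 2 < 50 * 2 ^ k := by
        have : (2:Int) ^ (k + 1) = 2 ^ k * 2 := by ring
        omega
      rw [show k + 1 + 5 = (k + 5) + 1 by omega, Function.iterate_succ_apply, hstep]
      by_cases hpar : n / 2 % 2 = 0
      · exact ih (n / 2) hpar hbound
      · have h1' : n / 2 % 2 = 1 := by omega
        have hge : 1 ≤ n / 2 := by omega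
        exact pvFix_mono (pv_odd_chain (n / 2) h1' hge) (k + 5) (by omega)

-- every admitted element is at a fixpoint after 64 steps
lemma pv_fix_64 {n : Int} (hd : -2147483648 ≤ n ∧ n ≤ 2147483648)
    (hp : ¬(n % 2 = 1 ∧ n < -1)) : pvFix (pvStep^[64] n) := by
  by_cases hpar : n % 2 = 0
  · have h2 : n < 50 * 2 ^ 26 := by norm_num; omega
    exact pvFix_mono (pv_even_chain 26 n hpar h2) 64 (by omega)
  · have h1 : n % 2 = 1 := by omega
    by_cases hneg : n = -1
    · subst hneg; exact pvFix_mono (j := 0) pvFix_neg_one 64 (by omega)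
    · have : 1 ≤ n := by omega
      exact pvFix_mono (pv_odd_chain n h1 this) 64 (by omega)

-- stepCount shift and basic facts
lemma stepCount_shift : ∀ (F : Nat) (v c : Int), stepCount F v c = c + stepCount F v 0 := by
  intro F
  induction F with
  | zero => intro v c; simp [stepCount]
  | succ F ih =>
    intro v c
    simp only [stepCount]
    by_cases h : pvStep v = v
    · simp [h]
    · simp [h, ih (pvStep v) (c + 1), ih (pvStep v) 1]; omega

lemma stepCount_fix {F : Nat} {v : Int} (h : pvStep v = v) : stepCount F v 0 = 0 := by
  cases F with
  | zero => rfl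
  | succ F => simp [stepCount, h]

lemma stepCount_succ_nonfix {F : Nat} {v : Int} (h : pvStep v ≠ v) :
    stepCount (F + 1) v 0 = 1 + stepCount F (pvStep v) 0 := by
  simp only [stepCount, if_neg h]
  rw [stepCount_shift F (pvStep v) (0 + 1)]
  omega

lemma stepCount_nonneg : ∀ (F : Nat) (v : Int), 0 ≤ stepCount F v 0 := by
  intro F
  induction F with
  | zero => intro v; simp [stepCount]
  | succ F ih =>
    intro v
    by_cases h : pvStep v = v
    · rw [stepCount_fix h]
    · rw [stepCount_succ_nonfix h]; have := ih (pvStep v); omega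

-- fold-max facts (the fold in pvMX / solution_alt)
lemma pvMX_acc_le (f : Int → Int) : ∀ (l : List Int) (b : Int),
    b ≤ l.foldl (fun best num => if f num > best then f num else best) b := by
  intro l
  induction l with
  | nil => intro b; simp
  | cons n l ih =>
    intro b
    simp only [List.foldl_cons]
    by_cases h : f n > b
    · simp only [if_pos h]; have := ih (f n); omega
    · simp only [if_neg h]; exact ih b
      
lemma pvMX_mem_le (f : Int → Int) : ∀ (l : List Int) (b : Int) (n : Int), n ∈ l →
    f n ≤ l.foldl (fun best num => if f num > best then f num else best) b := by
  intro l
  induction l with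
  | nil => intro b n h; simp at h
  | cons m l ih =>
    intro b n h
    simp only [List.foldl_cons]
    rcases List.mem_cons.mp h with h | h
    · subst h
      have hle : f n ≤ (if f n > b then f n else b) := by split <;> omega
      calc f n ≤ _ := hle
        _ ≤ _ := pvMX_acc_le f l _
    · exact ih _ n h

lemma pvMX_le (f : Int → Int) : ∀ (l : List Int) (b c : Int), b ≤ c →
    (∀ n ∈ l, f n ≤ c) →
    l.foldl (fun best num => if f num > best then f num else best) b ≤ c := by
  intro l
  induction l with
  | nil => intro b c hb _; simpa using hb
  | cons n l ih =>
    intro b c hb hall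
    simp only [List.foldl_cons]
    apply ih
    · have := hall n (by simp); split <;> omega
    · intro m hm; exact hall m (by simp [hm])

lemma pvMX_eq_fold (F : Nat) (arr : List Int) :
    pvMX F arr = arr.foldl (fun best num => if stepCount F num 0 > best then stepCount F num 0 else best) 0 := rfl

-- all-fixed characterization of A's stopping test
lemma map_eq_self_iff : ∀ (l : List Int), (l = l.map pvStep ↔ ∀ n ∈ l, pvStep n = n) := by
  intro l
  induction l with
  | nil => simp
  | cons n l ih =>
    simp only [List.map_cons, List.cons.injEq, List.mem_cons]
    constructor
    · rintro ⟨h1, h2⟩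
      intro m hm
      rcases hm with h | h
      · subst h; exact h1.symm
      · exact (ih.mp h2) m h
    · intro h
      exact ⟨(h n (Or.inl rfl)).symm, ih.mpr (fun m hm => h m (Or.inr hm))⟩

-- the non-fixed round: the per-element maxima shift by exactly one
lemma pvMX_succ (F : Nat) (arr : List Int)
    (hne : ∃ m ∈ arr, pvStep m ≠ m) :
    pvMX (F + 1) arr = 1 + pvMX F (arr.map pvStep) := by
  obtain ⟨m, hm, hmne⟩ := hne
  rw [pvMX_eq_fold, pvMX_eq_fold, List.foldl_map]
  set L := arr.foldl (fun best num => if stepCount (F+1) num 0 > best then stepCount (F+1) num 0 else best) 0 with hL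
  set R := arr.foldl (fun best num => if stepCount F (pvStep num) 0 > best then stepCount F (pvStep num) 0 else best) 0 with hR
  have hL1 : 1 ≤ L := by
    have h1 : stepCount (F + 1) m 0 = 1 + stepCount F (pvStep m) 0 := stepCount_succ_nonfix hmne
    have h2 : stepCount (F + 1) m 0 ≤ L := pvMX_mem_le _ arr 0 m hm
    have := stepCount_nonneg F (pvStep m)
    omega
  apply le_antisymm
  · apply pvMX_le _ arr 0 (1 + R)
    · have : (0:Int) ≤ R := pvMX_acc_le _ arr 0
      omega
    · intro n hn
      by_cases h : pvStep n = n
      · rw [stepCount_fix (F := F + 1) h]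
        have : (0:Int) ≤ R := pvMX_acc_le _ arr 0
        omega
      · rw [stepCount_succ_nonfix h]
        have := pvMX_mem_le (fun num => stepCount F (pvStep num) 0) arr 0 n hn
        simp only at this
        omega
  · have : R ≤ L - 1 := by
      apply pvMX_le _ arr 0 (L - 1)
      · omega
      · intro n hn
        by_cases h : pvStep n = n
        · rw [h, stepCount_fix (F := F) h]; omega
        · have h1 : stepCount (F + 1) n 0 = 1 + stepCount F (pvStep n) 0 := stepCount_succ_nonfix h
          have h2 : stepCount (F + 1) n 0 ≤ L := pvMX_mem_le _ arr 0 n hn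
          omega
    omega

-- all-fixed round: the maximum is 0
lemma pvMX_fixed (F : Nat) (arr : List Int) (h : ∀ n ∈ arr, pvStep n = n) :
    pvMX F arr = 0 := by
  rw [pvMX_eq_fold]
  apply le_antisymm
  · apply pvMX_le _ arr 0 0 (by omega)
    intro n hn; rw [stepCount_fix (h n hn)]
  · exact pvMX_acc_le _ arr 0

-- MAIN INVARIANT: with sufficient fuel, A's whole-array loop computes x + (max of per-element counts)
lemma pv_main : ∀ (F : Nat) (arr : List Int) (x : Int),
    (∀ n ∈ arr, pvFix (pvStep^[F] n)) →
    solutionLoop F arr x = x + pvMX F arr := by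
  intro F
  induction F with
  | zero =>
    intro arr x _
    have : pvMX 0 arr = 0 := by
      rw [pvMX_eq_fold]
      apply le_antisymm
      · exact pvMX_le _ arr 0 0 (by omega) (fun n _ => by simp [stepCount])
      · exact pvMX_acc_le _ arr 0
    simp [solutionLoop, this]
  | succ F ih =>
    intro arr x hsuf
    simp only [solutionLoop]
    by_cases h : arr = arr.map pvStep
    · rw [if_pos h, pvMX_fixed (F + 1) arr ((map_eq_self_iff arr).mp h)]
      omega
    · rw [if_neg h]
      have hne : ∃ m ∈ arr, pvStep m ≠ m := by
        by_contra hc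
        simp only [not_exists, not_and, not_not] at hc
        exact h ((map_eq_self_iff arr).mpr hc)
      have hsuf' : ∀ n ∈ arr.map pvStep, pvFix (pvStep^[F] n) := by
        intro n hn
        obtain ⟨m, hm, rfl⟩ := List.mem_map.mp hn
        have := hsuf m hm
        rwa [Function.iterate_succ_apply] at this
      rw [ih (arr.map pvStep) (x + 1) hsuf', pvMX_succ F arr hne]
      omega

-- ===== VERDICT (by name: the statement is the Claim_ definition above) =====
theorem solution_spec : Claim_equal_solution := by
  intro arr hdom hpre
  show solution arr = solution_alt arr
  have hsuf : ∀ n ∈ arr, pvFix (pvStep^[64] n) := by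
    intro n hn
    have hd : pvDomInt n = true := by
      have := List.all_eq_true.mp hdom n hn
      simpa using this
    have hd' : -2147483648 ≤ n ∧ n ≤ 2147483648 := by
      simpa [pvDomInt] using hd
    exact pv_fix_64 hd' (hpre n hn)
  have := pv_main 64 arr 0 hsuf
  simpa [solution, solution_alt, pvMX] using this
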